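-- pv_equiv track=rewrite | github.com/knome/kmrx | tools/rxengine.py | coalesce_grouped_characters_with_equal_transition_sets
-- ===== SOURCE A (Python) =====
-- def coalesce_grouped_characters_with_equal_transition_sets(
--     mcc ,
--     mcu ,
-- ):
--     umc = {}
--     for kk, mcrs in list( mcc.items() ) + [ (None, mcu), ]:
--         key = tuple( sorted( (cr, tuple(sorted(mms))) for cr, mms in mcrs.items() ) )
--         if key not in umc:
--             umc[ key ] = []
--         umc[ key ].append( kk )
--
--     return umc
-- ===== SOURCE B (Python) =====
-- def coalesce_grouped_characters_with_equal_transition_sets(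
--     mcc,
--     mcu,
-- ):
--     # Alternative decomposition: precompute each entry's canonical signature once,
--     # then build the distinct-signature order by an ordered dedup and select each
--     # group with a comprehension, instead of accumulating lists inside a dict.
--     def signature(mcrs):
--         return tuple(sorted((cr, tuple(sorted(mms))) for cr, mms in mcrs.items()))
--
--     pairs = [(signature(mcrs), kk) for kk, mcrs in mcc.items()]
--     pairs.append((signature(mcu), None))
--
--     order = []
--     for sig, _ in pairs:
--         if sig not in order:
--             order.append(sig)
--
--     return {sig: [kk for s, kk in pairs if s == sig] for sig in order}
-- ===== Notes on version B (the rewrite author's own statement) =====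
-- stated objective: alternative
-- what changed: B precomputes every entry's canonical signature into a (signature, key) pair list, builds the distinct-signature order by an ordered dedup, and selects each group's keys with a per-signature scan, instead of A's single pass that accumulates value lists inside a dict keyed by signatures computed in the loop.
import Mathlib
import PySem

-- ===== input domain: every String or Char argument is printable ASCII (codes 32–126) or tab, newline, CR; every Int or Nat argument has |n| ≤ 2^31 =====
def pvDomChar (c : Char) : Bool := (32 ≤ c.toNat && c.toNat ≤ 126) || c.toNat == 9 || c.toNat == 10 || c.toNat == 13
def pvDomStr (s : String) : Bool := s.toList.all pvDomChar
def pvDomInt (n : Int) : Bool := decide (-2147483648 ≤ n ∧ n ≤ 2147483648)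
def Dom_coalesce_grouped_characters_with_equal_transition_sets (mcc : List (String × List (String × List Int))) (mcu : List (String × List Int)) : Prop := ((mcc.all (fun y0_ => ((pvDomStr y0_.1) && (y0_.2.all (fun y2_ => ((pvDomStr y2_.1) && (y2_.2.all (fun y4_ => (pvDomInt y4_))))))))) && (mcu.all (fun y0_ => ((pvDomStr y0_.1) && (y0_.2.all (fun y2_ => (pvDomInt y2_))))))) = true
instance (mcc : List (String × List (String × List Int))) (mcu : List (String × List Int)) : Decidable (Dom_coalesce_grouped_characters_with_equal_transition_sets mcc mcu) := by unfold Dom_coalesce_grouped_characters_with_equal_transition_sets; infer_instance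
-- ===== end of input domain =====

-- B groups keys by precomputing (signature, key) pairs, deduping the signatures in order and
-- selecting each group by a scan, instead of A's dict-accumulation loop (objective: alternative).

-- shared helper: key = tuple(sorted((cr, tuple(sorted(mms))) for cr, mms in mcrs.items()))
def pvSignature (mcrs : List (String × List Int)) : List (String × List Int) :=
  PySem.List.sorted2
    ((PySem.Dict.ofList mcrs).items.map (fun p => (p.1, PySem.List.sorted p.2 (fun x => x) false)))
    (fun p => p.1) (fun p => p.2) false

-- ===== PORT A =====
def coalesce_grouped_characters_with_equal_transition_sets (mcc : List (String × List (String × List Int))) (mcu : List (String × List Int)) : List (List (String × List Int) × List (Option String)) :=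
  -- for kk, mcrs in list(mcc.items()) + [(None, mcu)]:
  let rows : List (Option String × List (String × List Int)) :=
    (PySem.Dict.ofList mcc).items.map (fun p => (some p.1, p.2)) ++ [(none, mcu)]
  let umc : PySem.Dict (List (String × List Int)) (List (Option String)) :=
    rows.foldl (fun umc r =>
      let key := pvSignature r.2
      -- if key not in umc: umc[key] = []
      let umc := if umc.contains key then umc else umc.insert key []
      -- umc[key].append(kk)
      umc.modify key [] (fun v => v ++ [r.1])) PySem.Dict.empty
  umc.items

-- ===== PORT B =====
def coalesce_grouped_characters_with_equal_transition_sets_alt (mcc : List (String × List (String × List Int))) (mcu : List (String × List Int)) : List (List (String × List Int) × List (Option String)) :=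
  let pairs : List (List (String × List Int) × Option String) :=
    (PySem.Dict.ofList mcc).items.map (fun p => (pvSignature p.2, some p.1)) ++ [(pvSignature mcu, none)]
  let order : List (List (String × List Int)) :=
    pairs.foldl (fun acc pr => if acc.contains pr.1 then acc else acc ++ [pr.1]) []
  order.map (fun sig => (sig, (pairs.filter (fun pr => pr.1 == sig)).map (fun pr => pr.2)))

-- ===== PRECONDITION & SPEC =====
def Spec_coalesce_grouped_characters_with_equal_transition_sets (mcc : List (String × List (String × List Int))) (mcu : List (String × List Int)) (out : List (List (String × List Int) × List (Option String))) : Prop := out = coalesce_grouped_characters_with_equal_transition_sets_alt mcc mcu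
instance (mcc : List (String × List (String × List Int))) (mcu : List (String × List Int)) (out : List (List (String × List Int) × List (Option String))) : Decidable (Spec_coalesce_grouped_characters_with_equal_transition_sets mcc mcu out) := by unfold Spec_coalesce_grouped_characters_with_equal_transition_sets; infer_instance

-- ===== CLAIM (what is proved, stated in full; the proofs are below) =====
def Claim_equal_coalesce_grouped_characters_with_equal_transition_sets : Prop := ∀ (mcc : List (String × List (String × List Int))) (mcu : List (String × List Int)), Dom_coalesce_grouped_characters_with_equal_transition_sets mcc mcu → Spec_coalesce_grouped_characters_with_equal_transition_sets mcc mcu (coalesce_grouped_characters_with_equal_transition_sets mcc mcu)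

-- ===== LEMMAS AND PROOFS =====

-- A's two-step "insert-empty-if-absent, then append" is one dict modify.
lemma pvStep_eq (d : PySem.Dict (List (String × List Int)) (List (Option String)))
    (k : List (String × List Int)) (v : Option String) :
    (if d.contains k then d else d.insert k []).modify k [] (fun l => l ++ [v])
      = d.modify k [] (fun l => l ++ [v]) := by
  cases hc : d.contains k with
  | true => simp
  | false =>
    simp only [Bool.false_eq_true, if_false, PySem.Dict.modify,
      PySem.Dict.getD_insert_self, PySem.Dict.insert_insert_self,
      PySem.Dict.getD_of_not_contains d [] hc]

-- the grouping fold, characterised as ordered-dedup-of-signatures plus per-signature selection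
lemma pvGroup_eq (L : List (List (String × List Int) × Option String)) :
    (L.foldl (fun d p => d.modify p.1 [] (fun v => v ++ [p.2]))
        (PySem.Dict.empty : PySem.Dict (List (String × List Int)) (List (Option String)))).items
      = (L.foldl (fun acc pr => if acc.contains pr.1 then acc else acc ++ [pr.1])
            ([] : List (List (String × List Int)))).map
          (fun sig => (sig, (L.filter (fun pr => pr.1 == sig)).map (fun pr => pr.2))) := by
  have hnd := PySem.Dict.nodup_keys_foldl_modify_key L (fun p => p.1) []
      (fun _ p => (fun v => v ++ [p.2]))
      (PySem.Dict.empty : PySem.Dict (List (String × List Int)) (List (Option String)))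
      (by simp [PySem.Dict.keys_empty])
  rw [PySem.Dict.items_eq_map_keys _ hnd []]
  rw [PySem.Dict.keys_foldl_modify_key L (fun p => p.1) [] (fun _ p => (fun v => v ++ [p.2]))]
  have horder : (L.foldl (fun acc pr => if acc.contains pr.1 then acc else acc ++ [pr.1])
      ([] : List (List (String × List Int))))
      = PySem.Set.update (PySem.Dict.empty :
          PySem.Dict (List (String × List Int)) (List (Option String))).keys (L.map (fun p => p.1)) := by
    simp [PySem.Set.update, PySem.Dict.keys_empty, List.foldl_map, PySem.Set.add]
  rw [horder]
  apply List.map_congr_left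
  intro k _
  rw [PySem.Dict.getD_foldl_modify_append]
  simp [PySem.Dict.getD_empty]

-- ===== VERDICT (by name: the statement is the Claim_ definition above) =====
theorem coalesce_grouped_characters_with_equal_transition_sets_spec : Claim_equal_coalesce_grouped_characters_with_equal_transition_sets := by
  intro mcc mcu _hdom
  unfold Spec_coalesce_grouped_characters_with_equal_transition_sets
  unfold coalesce_grouped_characters_with_equal_transition_sets
    coalesce_grouped_characters_with_equal_transition_sets_alt
  simp only []
  set X := (PySem.Dict.ofList mcc).items with hX
  set rows := X.map (fun p => (some p.1, p.2)) ++ [((none : Option String), mcu)] with hrows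
  have h1 := PySem.List.foldl_congr_mem rows
      (fun umc r =>
        (if umc.contains (pvSignature r.2) then umc else umc.insert (pvSignature r.2) []).modify
          (pvSignature r.2) [] (fun v => v ++ [r.1]))
      (fun umc r => umc.modify (pvSignature r.2) [] (fun v => v ++ [r.1]))
      (PySem.Dict.empty : PySem.Dict (List (String × List Int)) (List (Option String)))
      (fun acc x _ => pvStep_eq acc (pvSignature x.2) x.1)
  have h3 : rows.map (fun r => (pvSignature r.2, r.1))
      = X.map (fun p => (pvSignature p.2, some p.1)) ++ [(pvSignature mcu, (none : Option String))] := by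
    simp [hrows, List.map_map]
  have h4 : rows.foldl (fun umc r => umc.modify (pvSignature r.2) [] (fun v => v ++ [r.1]))
      (PySem.Dict.empty : PySem.Dict (List (String × List Int)) (List (Option String)))
      = (X.map (fun p => (pvSignature p.2, some p.1)) ++ [(pvSignature mcu, (none : Option String))]).foldl
          (fun d p => d.modify p.1 [] (fun v => v ++ [p.2])) PySem.Dict.empty := by
    rw [← h3, List.foldl_map]
  rw [h1, h4, pvGroup_eq]
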